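-- pv_equiv track=rewrite | github.com/rakesh-050791/DS-Algo | Advance/Graphs/01-Feb-2023.py | solve
-- ===== SOURCE A (Python) =====
-- import heapq as hq
--
-- def solve(grid, source, destination):
--     N , M = len(grid) , len(grid[0])
--
--     min_heap = []
--     hq.heappush(min_heap,(0,source[0],source[1]))                   # (Distance,Src,Node)
--     visited        = [[False] * M for _ in range(N)]
--
--     directions     = [[0,1],[1,0],[0,-1],[-1,0]]
--
--     while min_heap:
--         distance , cr , cc    =  hq.heappop(min_heap)
--
--         if cr == destination[0] and cc == destination[1]:
--             return distance
--
--         if visited[cr][cc]: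
--             continue
--
--         visited[cr][cc] = True
--
--         org_cr  = cr
--         org_cc  = cc
--         org_dis = distance
--         for i , j in directions:
--             cr =  org_cr
--             cc =  org_cc
--             cd =  org_dis
--             # move cur_point to all dirtns untl hits wall
--             while cr + i >= 0 and cr + i < N and cc + j >= 0 and cc + j < M and grid[cr+i][cc+j] == 0:
--                 cr += i
--                 cc += j
--                 cd += 1
--
--             hq.heappush(min_heap,(cd,cr,cc))
--
--     return -1
-- ===== SOURCE B (Python) =====
-- def solve(grid, source, destination):
--     N, M = len(grid), len(grid[0])
--     frontier = {(source[0], source[1]): 0}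
--     settled = set()
--     while frontier:
--         (cr, cc), distance = min(frontier.items(), key=lambda kv: (kv[1], kv[0]))
--         del frontier[(cr, cc)]
--         if cr == destination[0] and cc == destination[1]:
--             return distance
--         settled.add((cr, cc))
--         for i, j in ((0, 1), (1, 0), (0, -1), (-1, 0)):
--             r, c, d = cr, cc, distance
--             while 0 <= r + i < N and 0 <= c + j < M and grid[r + i][c + j] == 0:
--                 r += i
--                 c += j
--                 d += 1
--             if (r, c) not in settled and d < frontier.get((r, c), d + 1):
--                 frontier[(r, c)] = d
--     return -1
-- ===== Notes on version B (the rewrite author's own statement) =====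
-- stated objective: alternative
-- what changed: A is lazy Dijkstra: a heap of duplicate (distance,row,col) entries plus a visited matrix with skip-on-visited pops; B is eager decrease-key Dijkstra: a frontier dict holding one best tentative distance per cell (relaxed in place, min item popped per round) plus a settled set, so duplicate queue entries and the visited-skip logic disappear.
-- outside the precondition, e.g. on solve([[0, 0], [0, 0]], [-1, 0], [0, 0]): A returns -1, B returns 3; on solve([[0, 0, 1], [1, 1, 1], []], [0, 0], [9, 9]): A returns -1, B returns -1
import Mathlib
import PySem

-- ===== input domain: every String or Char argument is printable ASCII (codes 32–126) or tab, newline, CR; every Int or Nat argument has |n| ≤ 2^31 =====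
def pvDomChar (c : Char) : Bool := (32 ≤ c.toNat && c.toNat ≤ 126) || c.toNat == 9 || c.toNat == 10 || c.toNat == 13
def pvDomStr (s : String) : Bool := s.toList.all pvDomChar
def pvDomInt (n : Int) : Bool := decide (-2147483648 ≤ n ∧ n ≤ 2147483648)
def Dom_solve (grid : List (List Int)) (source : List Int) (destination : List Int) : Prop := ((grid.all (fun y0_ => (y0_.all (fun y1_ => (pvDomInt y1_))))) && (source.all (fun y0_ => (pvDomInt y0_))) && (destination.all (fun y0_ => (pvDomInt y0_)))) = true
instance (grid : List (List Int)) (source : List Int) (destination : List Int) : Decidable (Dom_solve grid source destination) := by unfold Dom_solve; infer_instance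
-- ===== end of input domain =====

-- B replaces A's lazy heap Dijkstra (duplicate heap entries + visited matrix + skip-on-visited)
-- by eager decrease-key Dijkstra: a frontier dict holding one best tentative distance per cell,
-- relaxed in place (objective: alternative).

-- ===== PORT A =====
-- Python's heapq holds tuples (distance, r, c); heappop returns the smallest tuple under
-- Python's lexicographic tuple order.  Equal tuples are identical values, so the heap is
-- faithfully a MULTISET with lexicographic-minimum extraction: heapMin picks the minimum
-- value and List.erase removes one occurrence of it (exact for the popped values).
def entryLt (a b : Int × Int × Int) : Bool :=
  decide (a.1 < b.1 ∨ (a.1 = b.1 ∧ (a.2.1 < b.2.1 ∨ (a.2.1 = b.2.1 ∧ a.2.2 < b.2.2))))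

def heapMin (l : List (Int × Int × Int)) : Option (Int × Int × Int) :=
  match l with
  | [] => none
  | e :: t => some (t.foldl (fun m x => if entryLt x m then x else m) e)

-- the inner 'while cr+i >= 0 and ... and grid[cr+i][cc+j] == 0' loop, shared verbatim by the
-- two Pythons; fueled (the fuel is never exhausted for the four unit directions: each move
-- lands in [0,N)x[0,M) and advances monotonically); none = IndexError reading a short row.
def slide (grid : List (List Int)) (N M i j : Int) : Int → Int → Int → Nat → Option (Int × Int × Int)
  | _, _, _, 0 => none
  | r, c, d, fuel+1 =>
    if 0 ≤ r + i ∧ r + i < N ∧ 0 ≤ c + j ∧ c + j < M then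
      match PySem.List.pyGet? grid (r + i) with
      | none => none
      | some row =>
        match PySem.List.pyGet? row (c + j) with
        | none => none
        | some v =>
          if v = 0 then slide grid N M i j (r + i) (c + j) (d + 1) fuel
          else some (r, c, d)
    else some (r, c, d)

def slideF (grid : List (List Int)) (N M i j r c d : Int) : Option (Int × Int × Int) :=
  slide grid N M i j r c d ((N + M).toNat + 2)

-- visited[cr][cc] read and write (Python indexing, negative indices wrap)
def mat2Get? (v : List (List Bool)) (r c : Int) : Option Bool :=
  match PySem.List.pyGet? v r with
  | none => none
  | some row => PySem.List.pyGet? row c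

def mat2Set (v : List (List Bool)) (r c : Int) : List (List Bool) :=
  PySem.List.pySetD v r (PySem.List.pySetD (PySem.List.pyGetD v r []) c true)

-- number of unvisited cells: the termination measure of A's while loop
def fc2 (v : List (List Bool)) : Nat := (v.map (fun row => row.count false)).sum

-- two termination facts for loopA (cited in decreasing_by), with their support
theorem foldlMin_mem {α : Type} (lt : α → α → Bool) :
    ∀ (t : List α) (a : α), t.foldl (fun m x => if lt x m then x else m) a ∈ a :: t := by
  intro t
  induction t with
  | nil => intro a; simp [List.foldl]
  | cons x t ih =>
    intro a
    simp only [List.foldl_cons]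
    rcases List.mem_cons.mp (ih (if lt x a then x else a)) with h | h
    · rw [h]
      by_cases hx : lt x a = true
      · rw [if_pos hx]; simp
      · rw [if_neg hx]; simp
    · simp [h]

theorem heapMin_mem {l : List (Int × Int × Int)} {e : Int × Int × Int}
    (h : heapMin l = some e) : e ∈ l := by
  cases l with
  | nil => simp [heapMin] at h
  | cons a t =>
    simp only [heapMin, Option.some.injEq] at h
    subst h
    exact foldlMin_mem entryLt t a

theorem count_false_set_true {l : List Bool} {b : Nat} (hb : b < l.length)
    (hf : l[b] = false) : (l.set b true).count false < l.count false := by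
  induction l generalizing b with
  | nil => simp at hb
  | cons x t ih =>
    cases b with
    | zero =>
      simp at hf; subst hf
      simp [List.count_cons]
    | succ b =>
      simp only [List.length_cons] at hb
      have := ih (b := b) (by omega) (by simpa using hf)
      simp only [List.set_cons_succ, List.count_cons]
      omega

theorem sum_map_set_lt {α : Type} (f : α → Nat) {v : List α} {a : Nat} (ha : a < v.length)
    {x : α} (hx : f x < f v[a]) :
    ((v.set a x).map f).sum < (v.map f).sum := by
  induction v generalizing a with
  | nil => simp at ha
  | cons y t ih =>
    cases a with
    | zero => simp only [List.set_cons_zero, List.map_cons, List.sum_cons]; simp at hx; omega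
    | succ a =>
      simp only [List.length_cons] at ha
      have := ih (a := a) (by omega) (by simpa using hx)
      simp only [List.set_cons_succ, List.map_cons, List.sum_cons]
      omega

theorem fc2_mat2Set_lt {v : List (List Bool)} {r c : Int}
    (h : mat2Get? v r c = some false) : fc2 (mat2Set v r c) < fc2 v := by
  unfold mat2Get? at h
  cases hrow : PySem.List.pyGet? v r with
  | none => simp [hrow] at h
  | some row =>
    rw [hrow] at h
    unfold mat2Set fc2
    have hrowD : PySem.List.pyGetD v r [] = row := by
      simp [PySem.List.pyGetD, hrow]
    rw [hrowD]
    -- resolve the two python indices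
    simp only [PySem.List.pyGet?] at hrow h
    cases ha : PySem.List.pyIdx? v.length r with
    | none => simp [ha] at hrow
    | some a =>
      rw [ha] at hrow
      cases hb : PySem.List.pyIdx? row.length c with
      | none => simp [hb] at h
      | some b =>
        rw [hb] at h
        simp only [Option.bind_some] at hrow h
        have haLt : a < v.length := by
          by_contra hcon
          rw [List.getElem?_eq_none (by omega)] at hrow
          simp at hrow
        have hbLt : b < row.length := by
          by_contra hcon
          rw [List.getElem?_eq_none (by omega)] at h
          simp at h
        rw [List.getElem?_eq_getElem haLt] at hrow
        rw [List.getElem?_eq_getElem hbLt] at h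
        have hrow' : v[a] = row := by simpa using hrow
        have hfb : row[b] = false := by simpa using h
        have hset : PySem.List.pySetD row c true = row.set b true := by
          simp [PySem.List.pySetD, PySem.List.pySet?, hb]
        have hset2 : PySem.List.pySetD v r (row.set b true) = v.set a (row.set b true) := by
          simp [PySem.List.pySetD, PySem.List.pySet?, ha]
        rw [hset, hset2]
        exact sum_map_set_lt _ haLt (by rw [hrow']; exact count_false_set_true hbLt hfb)

-- 'cr == destination[0] and cc == destination[1]' with Python's lazy 'and': destination[1]
-- is only read (and can only raise, = none) when cr equals destination[0]; shared verbatim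
-- by the two Pythons.
def destHit? (d0 : Int) (d1? : Option Int) (cr cc : Int) : Option Bool :=
  if cr = d0 then
    match d1? with
    | none => none
    | some d1 => some (decide (cc = d1))
  else some false

def loopA (grid : List (List Int)) (n m : Nat) (d0 : Int) (d1? : Option Int)
    (heap : List (Int × Int × Int)) (visited : List (List Bool)) : Option Int :=
  match hh : heapMin heap with
  | none => some (-1)
  | some (dist, cr, cc) =>
    match destHit? d0 d1? cr cc with
    | none => none
    | some true => some dist
    | some false =>
      match hv : mat2Get? visited cr cc with
      | none => none
      | some true => loopA grid n m d0 d1? (heap.erase (dist, cr, cc)) visited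
      | some false =>
        match slideF grid n m 0 1 cr cc dist, slideF grid n m 1 0 cr cc dist,
              slideF grid n m 0 (-1) cr cc dist, slideF grid n m (-1) 0 cr cc dist with
        | some (r1, c1, e1), some (r2, c2, e2), some (r3, c3, e3), some (r4, c4, e4) =>
          loopA grid n m d0 d1?
            (heap.erase (dist, cr, cc) ++ [(e1, r1, c1), (e2, r2, c2), (e3, r3, c3), (e4, r4, c4)])
            (mat2Set visited cr cc)
        | _, _, _, _ => none
  termination_by (fc2 visited, heap.length)
  decreasing_by
  · exact Prod.Lex.right _ (by
      have := List.length_erase_of_mem (heapMin_mem hh)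
      have hpos : 0 < heap.length := List.length_pos_of_mem (heapMin_mem hh)
      omega)
  · exact Prod.Lex.left _ _ (fc2_mat2Set_lt hv)

def solve (grid : List (List Int)) (source : List Int) (destination : List Int) : Int :=
  match PySem.List.pyGet? grid 0, PySem.List.pyGet? source 0, PySem.List.pyGet? source 1,
        PySem.List.pyGet? destination 0 with
  | some row0, some s0, some s1, some dd0 =>
    (loopA grid grid.length row0.length dd0 (PySem.List.pyGet? destination 1) [(0, s0, s1)]
      (List.replicate grid.length (List.replicate row0.length false))).getD 0
  | _, _, _, _ => 0   -- Python raises here (empty grid / short source / empty destination): outside Pre_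

-- ===== PORT B =====
-- min(frontier.items(), key=lambda kv: (kv[1], kv[0])): Python's tuple key is lexicographic,
-- which no PySem min primitive models for a nested tuple key, so the comparison is written out.
def itemLt (a b : (Int × Int) × Int) : Bool :=
  decide (a.2 < b.2 ∨ (a.2 = b.2 ∧ (a.1.1 < b.1.1 ∨ (a.1.1 = b.1.1 ∧ a.1.2 < b.1.2))))

def minItem (l : List ((Int × Int) × Int)) : Option ((Int × Int) × Int) :=
  match l with
  | [] => none
  | e :: t => some (t.foldl (fun m x => if itemLt x m then x else m) e)

-- 'if (r,c) not in settled and d < frontier.get((r,c), d+1): frontier[(r,c)] = d'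
def relax (settled : PySem.Set (Int × Int)) (f : PySem.Dict (Int × Int) Int)
    (w : Int × Int) (d : Int) : PySem.Dict (Int × Int) Int :=
  if ¬ PySem.Set.contains settled w = true ∧ d < f.getD w (d + 1) then f.insert w d else f

def loopB (grid : List (List Int)) (n m : Nat) (d0 : Int) (d1? : Option Int) :
    Nat → PySem.Dict (Int × Int) Int → PySem.Set (Int × Int) → Option Int
  | 0, _, _ => none
  | fuel+1, frontier, settled =>
    match minItem frontier.items with
    | none => some (-1)
    | some ((cr, cc), dist) =>
      match destHit? d0 d1? cr cc with
      | none => none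
      | some true => some dist
      | some false =>
        match slideF grid n m 0 1 cr cc dist, slideF grid n m 1 0 cr cc dist,
              slideF grid n m 0 (-1) cr cc dist, slideF grid n m (-1) 0 cr cc dist with
        | some (r1, c1, e1), some (r2, c2, e2), some (r3, c3, e3), some (r4, c4, e4) =>
          loopB grid n m d0 d1? fuel
            (relax (PySem.Set.add settled (cr, cc))
              (relax (PySem.Set.add settled (cr, cc))
                (relax (PySem.Set.add settled (cr, cc))
                  (relax (PySem.Set.add settled (cr, cc)) (frontier.erase (cr, cc)) (r1, c1) e1)
                  (r2, c2) e2)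
                (r3, c3) e3)
              (r4, c4) e4)
            (PySem.Set.add settled (cr, cc))
        | _, _, _, _ => none

def solve_alt (grid : List (List Int)) (source : List Int) (destination : List Int) : Int :=
  match PySem.List.pyGet? grid 0, PySem.List.pyGet? source 0, PySem.List.pyGet? source 1,
        PySem.List.pyGet? destination 0 with
  | some row0, some s0, some s1, some dd0 =>
    (loopB grid grid.length row0.length dd0 (PySem.List.pyGet? destination 1)
      (grid.length * row0.length + 2)
      (PySem.Dict.ofList [((s0, s1), 0)]) PySem.Set.empty).getD 0
  | _, _, _, _ => 0   -- Python raises here: outside Pre_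

-- ===== PRECONDITION & SPEC =====
-- the source cell cannot move: each of the four slide targets is out of bounds or a readable
-- non-zero cell (then A settles the source, drains four stale heap copies and returns -1)
def BlockedDir (grid : List (List Int)) (s0 s1 i j : Int) : Prop :=
  ¬(0 ≤ s0 + i ∧ s0 + i < (grid.length : Int) ∧ 0 ≤ s1 + j ∧
      s1 + j < ((grid.getD 0 []).length : Int)) ∨
  ((s1 + j).toNat < (grid.getD (s0 + i).toNat []).length ∧
    (grid.getD (s0 + i).toNat []).getD (s1 + j).toNat 0 ≠ 0)

def StuckSrc (grid : List (List Int)) (s0 s1 : Int) : Prop :=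
  BlockedDir grid s0 s1 0 1 ∧ BlockedDir grid s0 s1 1 0 ∧
  BlockedDir grid s0 s1 0 (-1) ∧ BlockedDir grid s0 s1 (-1) 0

-- Pre_ excludes the inputs where A raises (empty grid, source shorter than 2 or outside the
-- matrix's wraparound index range, empty destination, a slide that reads a row shorter than
-- row 0, a destination[1] read on a too-short destination), the negative source coordinates
-- from which the ball can slide into the grid (A's value there comes from Python's
-- negative-index wraparound aliasing two cells of the visited matrix - a corner no caller
-- would specify) and ragged grids whose run avoids the IndexError only by accident.
def Pre_solve (grid : List (List Int)) (source : List Int) (destination : List Int) : Prop :=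
  grid ≠ [] ∧ 2 ≤ source.length ∧ 1 ≤ destination.length ∧
  ((2 ≤ destination.length ∧ source.getD 0 0 = destination.getD 0 0 ∧
      source.getD 1 0 = destination.getD 1 0) ∨
   (-(grid.length : Int) ≤ source.getD 0 0 ∧ source.getD 0 0 < (grid.length : Int) ∧
    -((grid.getD 0 []).length : Int) ≤ source.getD 1 0 ∧
    source.getD 1 0 < ((grid.getD 0 []).length : Int) ∧
    (2 ≤ destination.length ∨
      (destination.getD 0 0 ≠ source.getD 0 0 ∧
       ¬(0 ≤ destination.getD 0 0 ∧ destination.getD 0 0 < (grid.length : Int)))) ∧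
    (StuckSrc grid (source.getD 0 0) (source.getD 1 0) ∨
      ((∀ row ∈ grid, (grid.getD 0 []).length ≤ row.length) ∧
       0 ≤ source.getD 0 0 ∧ 0 ≤ source.getD 1 0))))
instance (grid : List (List Int)) (source : List Int) (destination : List Int) : Decidable (Pre_solve grid source destination) := by unfold Pre_solve StuckSrc BlockedDir; infer_instance

def pvWitness_solve : List (List Int) × List Int × List Int := ([[0, 0], [0, 1]], [0, 0], [1, 0])

def Spec_solve (grid : List (List Int)) (source : List Int) (destination : List Int) (out : Int) : Prop := out = solve_alt grid source destination
instance (grid : List (List Int)) (source : List Int) (destination : List Int) (out : Int) : Decidable (Spec_solve grid source destination out) := by unfold Spec_solve; infer_instance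

-- ===== CLAIM (what is proved, stated in full; the proofs are below) =====
def Claim_equal_solve : Prop := ∀ (grid : List (List Int)) (source : List Int) (destination : List Int), Dom_solve grid source destination → Pre_solve grid source destination → Spec_solve grid source destination (solve grid source destination)

-- ===== LEMMAS AND PROOFS =====

-- ---- generic first-minimum folds ----
theorem foldlMin_spec {α : Type} (lt : α → α → Bool)
    (hirr : ∀ x, lt x x = false)
    (htrans : ∀ x y z, lt x y = true → lt y z = true → lt x z = true)
    (htot : ∀ a x r, lt x a = false → lt x r = true → lt a r = true) :
    ∀ (t : List α) (a : α), ∀ y ∈ a :: t,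
      lt y (t.foldl (fun m x => if lt x m then x else m) a) = false := by
  intro t
  induction t with
  | nil =>
    intro a y hy
    rcases List.mem_singleton.mp hy with rfl
    simpa using hirr y
  | cons x t ih =>
    intro a y hy
    simp only [List.foldl_cons]
    by_cases hx : lt x a = true
    · rw [if_pos hx]
      rcases List.mem_cons.mp hy with hya | hy'
      · -- y = a and lt x a : suppose lt a r; then lt x r, contradicting ih at x
        subst hya
        by_contra hc
        have hc' : lt y (List.foldl (fun m x => if lt x m then x else m) x t) = true := by
          revert hc; cases lt y (List.foldl (fun m x => if lt x m then x else m) x t) <;> simp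
        have h2 := ih x x List.mem_cons_self
        rw [htrans _ _ _ hx hc'] at h2; cases h2
      · exact ih x y hy'
    · rw [if_neg hx]
      have hx' : lt x a = false := by revert hx; cases lt x a <;> simp
      rcases List.mem_cons.mp hy with hya | hy'
      · subst hya; exact ih y y List.mem_cons_self
      · rcases List.mem_cons.mp hy' with hyx | h
        · -- y = x, lt x a = false
          subst hyx
          by_contra hc
          have hc' : lt y (List.foldl (fun m x => if lt x m then x else m) a t) = true := by
            revert hc; cases lt y (List.foldl (fun m x => if lt x m then x else m) a t) <;> simp
          have := htot a y _ hx' hc'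
          have h2 := ih a a List.mem_cons_self
          rw [this] at h2; cases h2
        · exact ih a y (List.mem_cons_of_mem _ h)

theorem foldlMin_unique {α : Type} (lt : α → α → Bool)
    (hirr : ∀ x, lt x x = false)
    (hasym : ∀ x y, lt x y = true → lt y x = false) :
    ∀ (t : List α) (a u : α), (a = u ∨ lt u a = true) → (∀ y ∈ t, y = u ∨ lt u y = true) →
      (u = a ∨ u ∈ t) → t.foldl (fun m x => if lt x m then x else m) a = u := by
  intro t
  induction t with
  | nil =>
    intro a u _ _ hmem
    rcases hmem with rfl | h
    · simp
    · simp at h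
  | cons x t ih =>
    intro a u ha hall hmem
    simp only [List.foldl_cons]
    rcases ha with hau | hua
    · -- a = u
      subst hau
      have hrec := ih a a (Or.inl rfl) (fun y hy => hall y (List.mem_cons_of_mem _ hy)) (Or.inl rfl)
      rcases hall x List.mem_cons_self with hxu | hux
      · subst hxu
        rw [hirr, if_neg (by simp)]
        exact hrec
      · rw [hasym _ _ hux, if_neg (by simp)]
        exact hrec
    · -- lt u a
      rcases hall x List.mem_cons_self with hxu | hux
      · subst hxu
        rw [hua, if_pos rfl]
        exact ih x x (Or.inl rfl) (fun y hy => hall y (List.mem_cons_of_mem _ hy)) (Or.inl rfl)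
      · have hmem' : u ∈ t := by
          rcases hmem with rfl | h
          · rw [hirr] at hua; cases hua
          · rcases List.mem_cons.mp h with rfl | h'
            · rw [hirr] at hux; cases hux
            · exact h'
        by_cases hx : lt x a = true
        · rw [if_pos hx]
          exact ih x u (Or.inr hux) (fun y hy => hall y (List.mem_cons_of_mem _ hy)) (Or.inr hmem')
        · rw [if_neg hx]
          exact ih a u (Or.inr hua) (fun y hy => hall y (List.mem_cons_of_mem _ hy)) (Or.inr hmem')

-- order facts for the two comparators
theorem entryLt_irrefl : ∀ x, entryLt x x = false := by
  intro x
  simp only [entryLt, decide_eq_false_iff_not]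
  omega

theorem entryLt_trans : ∀ x y z, entryLt x y = true → entryLt y z = true → entryLt x z = true := by
  intro x y z hx hy
  simp only [entryLt, decide_eq_true_eq] at *
  omega

theorem entryLt_tot : ∀ a x r, entryLt x a = false → entryLt x r = true → entryLt a r = true := by
  intro a x r hx hr
  simp only [entryLt, decide_eq_false_iff_not, decide_eq_true_eq] at *
  omega

theorem itemLt_irrefl : ∀ x, itemLt x x = false := by
  intro x
  simp only [itemLt, decide_eq_false_iff_not]
  omega

theorem itemLt_asymm : ∀ x y, itemLt x y = true → itemLt y x = false := by
  intro x y h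
  simp only [itemLt, decide_eq_false_iff_not, decide_eq_true_eq] at *
  omega

theorem heapMin_spec {l : List (Int × Int × Int)} {e : Int × Int × Int}
    (h : heapMin l = some e) : e ∈ l ∧ ∀ y ∈ l, entryLt y e = false := by
  refine ⟨heapMin_mem h, ?_⟩
  cases l with
  | nil => simp [heapMin] at h
  | cons a t =>
    simp only [heapMin, Option.some.injEq] at h
    subst h
    exact foldlMin_spec entryLt entryLt_irrefl entryLt_trans entryLt_tot t a

theorem minItem_eq {l : List ((Int × Int) × Int)} {u : (Int × Int) × Int}
    (hu : u ∈ l) (hmin : ∀ y ∈ l, y = u ∨ itemLt u y = true) : minItem l = some u := by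
  cases l with
  | nil => simp at hu
  | cons a t =>
    simp only [minItem, Option.some.injEq]
    exact foldlMin_unique itemLt itemLt_irrefl itemLt_asymm t a u
      (by rcases hmin a List.mem_cons_self with h | h
          · exact Or.inl h
          · exact Or.inr h)
      (fun y hy => hmin y (List.mem_cons_of_mem _ hy))
      (by rcases List.mem_cons.mp hu with h | h
          · exact Or.inl h
          · exact Or.inr h)

-- ---- per-cell minimum of the heap multiset ----
def cellMin : List (Int × Int × Int) → Int × Int → Option Int
  | [], _ => none
  | (d, r, c) :: t, w =>
    if (r, c) = w then
      match cellMin t w with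
      | none => some d
      | some m => some (min d m)
    else cellMin t w

theorem cellMin_memEntry : ∀ {l : List (Int × Int × Int)} {w : Int × Int} {mv : Int},
    cellMin l w = some mv → (mv, w.1, w.2) ∈ l := by
  intro l
  induction l with
  | nil => intro w mv h; simp [cellMin] at h
  | cons e t ih =>
    obtain ⟨d, r, c⟩ := e
    intro w mv h
    simp only [cellMin] at h
    by_cases hw : (r, c) = w
    · rw [if_pos hw] at h
      cases ht : cellMin t w with
      | none =>
        rw [ht] at h; simp at h
        subst h
        subst hw
        simp
      | some m =>
        rw [ht] at h; simp at h
        rcases min_choice d m with hm | hm <;> rw [hm] at h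
        · subst h; subst hw; simp
        · subst h; exact List.mem_cons_of_mem _ (ih ht)
    · rw [if_neg hw] at h
      exact List.mem_cons_of_mem _ (ih h)

theorem cellMin_le : ∀ {l : List (Int × Int × Int)} {d r c : Int},
    (d, r, c) ∈ l → ∃ mv, cellMin l (r, c) = some mv ∧ mv ≤ d := by
  intro l
  induction l with
  | nil => intro d r c h; simp at h
  | cons e t ih =>
    obtain ⟨d', r', c'⟩ := e
    intro d r c h
    rcases List.mem_cons.mp h with he | ht
    · obtain ⟨h1, h2, h3⟩ : d = d' ∧ r = r' ∧ c = c' := by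
        simpa [Prod.ext_iff] using he
      subst h1; subst h2; subst h3
      simp only [cellMin, if_pos rfl]
      cases ht : cellMin t (r, c) with
      | none => simp only [ht]; exact ⟨d, rfl, le_refl _⟩
      | some m => simp only [ht]; exact ⟨min d m, rfl, min_le_left _ _⟩
    · obtain ⟨mv, hmv, hle⟩ := ih ht
      simp only [cellMin]
      by_cases hw : (r', c') = (r, c)
      · rw [if_pos hw, hmv]
        exact ⟨min d' mv, rfl, le_trans (min_le_right _ _) hle⟩
      · rw [if_neg hw, hmv]
        exact ⟨mv, rfl, hle⟩

theorem cellMin_append_ne {l : List (Int × Int × Int)} {d : Int} {p w : Int × Int}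
    (h : p ≠ w) : cellMin (l ++ [(d, p.1, p.2)]) w = cellMin l w := by
  induction l with
  | nil => simp [cellMin, h]
  | cons e t ih =>
    obtain ⟨d', r', c'⟩ := e
    simp only [List.cons_append, cellMin, ih]

theorem cellMin_append_self {l : List (Int × Int × Int)} {d : Int} {w : Int × Int} :
    cellMin (l ++ [(d, w.1, w.2)]) w = some ((cellMin l w).elim d (fun m => min m d)) := by
  induction l with
  | nil => simp [cellMin]
  | cons e t ih =>
    obtain ⟨d', r', c'⟩ := e
    simp only [List.cons_append, cellMin, ih]
    by_cases hw : (r', c') = w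
    · rw [if_pos hw, if_pos hw]
      cases ht : cellMin t w with
      | none => simp
      | some m => simp
    · rw [if_neg hw, if_neg hw]

theorem cellMin_erase {l : List (Int × Int × Int)} {d r c : Int} {w : Int × Int}
    (h : (r, c) ≠ w) : cellMin (l.erase (d, r, c)) w = cellMin l w := by
  induction l with
  | nil => rfl
  | cons e t ih =>
    rw [List.erase_cons]
    by_cases he : e = (d, r, c)
    · rw [if_pos (by simp [he])]
      subst he
      simp only [cellMin]
      rw [if_neg h]
    · rw [if_neg (by simp [he])]
      obtain ⟨d', r', c'⟩ := e
      simp only [cellMin, ih]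

-- ---- Dict.erase lemmas (none exist in the prelude) ----
theorem dict_get?_erase_self {κ ν : Type} [BEq κ] [LawfulBEq κ] (d : PySem.Dict κ ν) (k : κ) :
    (d.erase k).get? k = none := by
  obtain ⟨items⟩ := d
  simp only [PySem.Dict.erase, PySem.Dict.get?]
  rw [List.find?_eq_none.mpr]
  · rfl
  · intro p hp
    have := (List.mem_filter.mp hp).2
    simp at this ⊢
    exact this

theorem dict_get?_erase_of_ne {κ ν : Type} [BEq κ] [LawfulBEq κ] (d : PySem.Dict κ ν) {k k' : κ}
    (h : k' ≠ k) : (d.erase k).get? k' = d.get? k' := by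
  obtain ⟨items⟩ := d
  simp only [PySem.Dict.erase, PySem.Dict.get?]
  congr 1
  induction items with
  | nil => rfl
  | cons p t ih =>
    by_cases hp : p.1 = k
    · rw [List.filter_cons_of_neg (by simp [hp]),
          List.find?_cons_of_neg (by simp [hp]; exact fun e => h e.symm)]
      exact ih
    · rw [List.filter_cons_of_pos (by simp [hp])]
      by_cases hp' : p.1 = k'
      · rw [List.find?_cons_of_pos (by simp [hp']), List.find?_cons_of_pos (by simp [hp'])]
      · rw [List.find?_cons_of_neg (by simp [hp']), List.find?_cons_of_neg (by simp [hp'])]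
        exact ih

theorem dict_nodup_keys_erase {κ ν : Type} [BEq κ] (d : PySem.Dict κ ν) (k : κ)
    (h : d.keys.Nodup) : (d.erase k).keys.Nodup := by
  obtain ⟨items⟩ := d
  exact (List.filter_sublist.map _).nodup h

theorem dict_items_nil {κ ν : Type} [BEq κ] [LawfulBEq κ] (d : PySem.Dict κ ν)
    (hnd : d.keys.Nodup) (h : ∀ k, d.get? k = none) : d.items = [] := by
  rw [List.eq_nil_iff_forall_not_mem]
  rintro ⟨k, w⟩ hp
  have := PySem.Dict.get?_of_mem_items _ hp hnd
  rw [h] at this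
  cases this

-- ---- slide: in-bounds results and fuel sufficiency ----
theorem slide_bounds {grid : List (List Int)} {N M i j : Int} :
    ∀ {fuel : Nat} {r c d r' c' d' : Int},
      slide grid N M i j r c d fuel = some (r', c', d') →
      (r' = r ∧ c' = c ∧ d' = d) ∨ (0 ≤ r' ∧ r' < N ∧ 0 ≤ c' ∧ c' < M) := by
  intro fuel
  induction fuel with
  | zero => intro r c d r' c' d' h; simp [slide] at h
  | succ fuel ih =>
    intro r c d r' c' d' h
    simp only [slide] at h
    split at h
    · rename_i hcond
      cases hg : PySem.List.pyGet? grid (r + i) with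
      | none => simp [hg] at h
      | some row =>
        simp only [hg] at h
        cases hr : PySem.List.pyGet? row (c + j) with
        | none => simp [hr] at h
        | some v =>
          simp only [hr] at h
          by_cases hv : v = 0
          · rw [if_pos hv] at h
            rcases ih h with ⟨h1, h2, _⟩ | hb
            · right; omega
            · right; exact hb
          · rw [if_neg hv] at h
            simp at h
            left; omega
    · simp at h
      left; omega

theorem slide_isSome {grid : List (List Int)} {n m : Nat}
    (hn : grid.length = n) (hrows : ∀ row ∈ grid, m ≤ row.length) {i j : Int} :
    ∀ (fuel : Nat) (r c d : Int), 0 ≤ r → r < (n : Int) → 0 ≤ c → c < (m : Int) →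
      ((i = 0 ∧ j = 1 ∧ (m : Int) - c ≤ fuel) ∨ (i = 1 ∧ j = 0 ∧ (n : Int) - r ≤ fuel) ∨
       (i = 0 ∧ j = -1 ∧ c + 1 ≤ fuel) ∨ (i = -1 ∧ j = 0 ∧ r + 1 ≤ fuel)) →
      (slide grid (n : Int) (m : Int) i j r c d fuel).isSome := by
  intro fuel
  induction fuel with
  | zero =>
    intro r c d h1 h2 h3 h4 hb
    rcases hb with ⟨_, _, e⟩ | ⟨_, _, e⟩ | ⟨_, _, e⟩ | ⟨_, _, e⟩ <;> omega
  | succ fuel ih =>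
    intro r c d h1 h2 h3 h4 hb
    simp only [slide]
    split
    · rename_i hcond
      obtain ⟨hc1, hc2, hc3, hc4⟩ := hcond
      have hgr : PySem.List.pyGet? grid (r + i) = some (grid[(r + i).toNat]'(by omega)) := by
        apply PySem.List.pyGet?_eq_some_getElem <;> omega
      simp only [hgr]
      have hrowlen : m ≤ (grid[(r + i).toNat]'(by omega)).length :=
        hrows _ (List.getElem_mem _)
      have hrw : PySem.List.pyGet? (grid[(r + i).toNat]'(by omega)) (c + j) =
          some ((grid[(r + i).toNat]'(by omega))[(c + j).toNat]'(by omega)) := by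
        apply PySem.List.pyGet?_eq_some_getElem
        · omega
        · omega
      simp only [hrw]
      split
      · apply ih (r + i) (c + j) (d + 1) hc1 hc2 hc3 hc4
        rcases hb with ⟨e1, e2, e3⟩ | ⟨e1, e2, e3⟩ | ⟨e1, e2, e3⟩ | ⟨e1, e2, e3⟩
        · left; refine ⟨e1, e2, ?_⟩; push_cast; omega
        · right; left; refine ⟨e1, e2, ?_⟩; push_cast; omega
        · right; right; left; refine ⟨e1, e2, ?_⟩; push_cast; omega
        · right; right; right; refine ⟨e1, e2, ?_⟩; push_cast; omega
      · rfl
    · rfl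

theorem slideF_isSome {grid : List (List Int)} {n m : Nat}
    (hn : grid.length = n) (hrows : ∀ row ∈ grid, m ≤ row.length) {i j r c : Int} (d : Int)
    (hd : (i = 0 ∧ j = 1) ∨ (i = 1 ∧ j = 0) ∨ (i = 0 ∧ j = -1) ∨ (i = -1 ∧ j = 0))
    (h1 : 0 ≤ r) (h2 : r < (n : Int)) (h3 : 0 ≤ c) (h4 : c < (m : Int)) :
    (slideF grid (n : Int) (m : Int) i j r c d).isSome := by
  unfold slideF
  apply slide_isSome hn hrows _ r c d h1 h2 h3 h4
  have : (((n : Int) + (m : Int)).toNat : Int) = (n : Int) + (m : Int) := by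
    rw [Int.toNat_of_nonneg] ; omega
  rcases hd with ⟨e1, e2⟩ | ⟨e1, e2⟩ | ⟨e1, e2⟩ | ⟨e1, e2⟩
  · left; refine ⟨e1, e2, ?_⟩; push_cast [this]; omega
  · right; left; refine ⟨e1, e2, ?_⟩; push_cast [this]; omega
  · right; right; left; refine ⟨e1, e2, ?_⟩; push_cast [this]; omega
  · right; right; right; refine ⟨e1, e2, ?_⟩; push_cast [this]; omega

-- ---- pop agreement: the unsettled cell A pops is B's frontier minimum ----
theorem cellMin_of_heapMin {heap : List (Int × Int × Int)} {dist cr cc : Int}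
    (hh : heapMin heap = some (dist, cr, cc)) : cellMin heap (cr, cc) = some dist := by
  obtain ⟨hmem, hall⟩ := heapMin_spec hh
  obtain ⟨mv, hmv, hle⟩ := cellMin_le hmem
  have hment := cellMin_memEntry hmv
  have := hall _ hment
  simp only [entryLt, decide_eq_false_iff_not] at this
  have : mv = dist := by omega
  rw [← this]; exact hmv

theorem pop_agree {heap : List (Int × Int × Int)} {frontier : PySem.Dict (Int × Int) Int}
    {settled : PySem.Set (Int × Int)} {dist cr cc : Int}
    (hh : heapMin heap = some (dist, cr, cc))
    (hnd : frontier.keys.Nodup)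
    (hs : ∀ v, v ∈ settled → frontier.get? v = none)
    (hu : ∀ v, v ∉ settled → frontier.get? v = cellMin heap v)
    (hcr : ((cr, cc) : Int × Int) ∉ settled) :
    minItem frontier.items = some ((cr, cc), dist) := by
  obtain ⟨hmem, hall⟩ := heapMin_spec hh
  have hget : frontier.get? (cr, cc) = some dist := by
    rw [hu _ hcr]; exact cellMin_of_heapMin hh
  apply minItem_eq (PySem.Dict.mem_items_of_get?_eq_some _ hget)
  rintro ⟨w, dv⟩ hy
  have hgy := PySem.Dict.get?_of_mem_items _ hy hnd
  by_cases hws : w ∈ settled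
  · rw [hs _ hws] at hgy; cases hgy
  · rw [hu _ hws] at hgy
    have hment := cellMin_memEntry hgy
    have hlt := hall _ hment
    by_cases hww : w = (cr, cc)
    · left
      rw [hww] at hgy
      rw [cellMin_of_heapMin hh] at hgy
      simp at hgy
      rw [hww, hgy]
    · right
      have hne : ¬ (w.1 = cr ∧ w.2 = cc) := by
        intro ⟨e1, e2⟩; exact hww (Prod.ext e1 e2)
      simp only [entryLt, decide_eq_false_iff_not] at hlt
      simp only [itemLt, decide_eq_true_eq]
      omega

-- ---- visited-matrix index lemmas ----
theorem mat2Get?_eq {v : List (List Bool)} {m : Nat} (hrows : ∀ row ∈ v, row.length = m)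
    {r c : Int} (hr0 : 0 ≤ r) (hrn : r < (v.length : Int)) (hc0 : 0 ≤ c) (hcm : c < (m : Int)) :
    mat2Get? v r c = some ((v.getD r.toNat []).getD c.toNat false) := by
  unfold mat2Get?
  have hlt : r.toNat < v.length := by omega
  have h1 : PySem.List.pyGet? v r = some (v[r.toNat]'hlt) :=
    PySem.List.pyGet?_eq_some_getElem v hr0 hrn
  simp only [h1]
  have hrowlen : (v[r.toNat]'hlt).length = m := hrows _ (List.getElem_mem _)
  have h2 : PySem.List.pyGet? (v[r.toNat]'hlt) c = some ((v[r.toNat]'hlt)[c.toNat]'(by omega)) :=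
    PySem.List.pyGet?_eq_some_getElem _ hc0 (by omega)
  rw [h2]
  congr 1
  rw [List.getD_eq_getElem?_getD, List.getD_eq_getElem?_getD,
      List.getElem?_eq_getElem hlt]
  simp [List.getElem?_eq_getElem (by omega : c.toNat < (v[r.toNat]'hlt).length)]

theorem mat2Set_eq {v : List (List Bool)} {r c : Int} (hr0 : 0 ≤ r) (hrn : r < (v.length : Int))
    (hc0 : 0 ≤ c) :
    mat2Set v r c = v.set r.toNat ((v[r.toNat]'(by omega)).set c.toNat true) := by
  unfold mat2Set
  rw [PySem.List.pyGetD_eq_getElem v [] hr0 hrn,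
      PySem.List.pySetD_of_nonneg _ _ hc0, PySem.List.pySetD_of_nonneg _ _ hr0]

theorem getD_set_nat {α : Type} {l : List α} {a : Nat} {x : α} (r' : Nat) (d : α)
    (h : a < l.length) :
    (l.set a x).getD r' d = if r' = a then x else l.getD r' d := by
  rw [List.getD_eq_getElem?_getD, List.getD_eq_getElem?_getD, List.getElem?_set]
  by_cases he : a = r'
  · subst he; simp [h]
  · rw [if_neg he, if_neg (fun e => he e.symm)]

-- ---- relaxation preserves the per-cell-minimum invariant ----
theorem relax_pres {settled : PySem.Set (Int × Int)} {frontier : PySem.Dict (Int × Int) Int}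
    {heap : List (Int × Int × Int)} {w : Int × Int} {dnew : Int}
    (hnd : frontier.keys.Nodup)
    (hs : ∀ v, v ∈ settled → frontier.get? v = none)
    (hu : ∀ v, v ∉ settled → frontier.get? v = cellMin heap v) :
    (relax settled frontier w dnew).keys.Nodup ∧
    (∀ v, v ∈ settled → (relax settled frontier w dnew).get? v = none) ∧
    (∀ v, v ∉ settled → (relax settled frontier w dnew).get? v =
      cellMin (heap ++ [(dnew, w.1, w.2)]) v) := by
  unfold relax
  split
  · rename_i hcond
    obtain ⟨hws, hlt⟩ := hcond
    have hwmem : w ∉ settled := fun hmem => hws ((PySem.Set.contains_iff _ _).mpr hmem)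
    refine ⟨PySem.Dict.nodup_keys_insert _ _ _ hnd, ?_, ?_⟩
    · intro v hv
      rw [PySem.Dict.get?_insert, if_neg (fun he => hwmem (by rwa [he] at hv))]
      exact hs v hv
    · intro v hv
      rw [PySem.Dict.get?_insert]
      by_cases hvw : v = w
      · subst hvw
        rw [if_pos rfl, cellMin_append_self]
        rw [PySem.Dict.getD_eq_get?_getD, hu v hv] at hlt
        cases hm : cellMin heap v with
        | none => simp
        | some mm =>
          rw [hm] at hlt
          simp only [Option.getD_some] at hlt
          simp only [hm, Option.elim_some, Option.some.injEq]
          omega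
      · rw [if_neg hvw, hu v hv, cellMin_append_ne (fun he => hvw he.symm)]
  · rename_i hcond
    refine ⟨hnd, hs, ?_⟩
    intro v hv
    by_cases hvw : v = w
    · subst hvw
      have hge : ¬ dnew < frontier.getD v (dnew + 1) := by
        intro hlt; exact hcond ⟨by simpa using hv, hlt⟩
      rw [PySem.Dict.getD_eq_get?_getD, hu v hv] at hge
      cases hm : cellMin heap v with
      | none => rw [hm] at hge; simp at hge
      | some mm =>
        rw [hm] at hge
        simp only [Option.getD_some] at hge
        rw [hu v hv, cellMin_append_self, hm]
        simp only [Option.elim_some, Option.some.injEq]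
        omega
    · rw [hu v hv, cellMin_append_ne (fun he => hvw he.symm)]

theorem fc2_init (n m : Nat) : fc2 (List.replicate n (List.replicate m false)) = n * m := by
  unfold fc2
  simp [List.map_replicate, List.sum_replicate, List.count_replicate, smul_eq_mul]

-- ---- destHit? basic facts ----
theorem destHit?_none_elim {d0 : Int} {d1? : Option Int} {cr cc : Int}
    (h : destHit? d0 d1? cr cc = none) : cr = d0 ∧ d1? = none := by
  unfold destHit? at h
  by_cases he : cr = d0
  · refine ⟨he, ?_⟩
    rw [if_pos he] at h
    cases d1? with
    | none => rfl
    | some d1 => simp at h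
  · rw [if_neg he] at h
    cases h

-- ---- the simulation: lazy heap Dijkstra (A) against eager decrease-key Dijkstra (B) ----
theorem sim (grid : List (List Int)) (n m : Nat) (d0 : Int) (d1? : Option Int)
    (hn : grid.length = n) (hrows : ∀ row ∈ grid, m ≤ row.length)
    (hd1 : d1? = none → ¬(0 ≤ d0 ∧ d0 < (n : Int))) :
    ∀ (heap : List (Int × Int × Int)) (visited : List (List Bool)),
      ∀ (frontier : PySem.Dict (Int × Int) Int) (settled : PySem.Set (Int × Int)) (fuel : Nat),
      visited.length = n →
      (∀ row ∈ visited, row.length = m) →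
      (∀ e ∈ heap, 0 ≤ e.2.1 ∧ e.2.1 < (n : Int) ∧ 0 ≤ e.2.2 ∧ e.2.2 < (m : Int)) →
      (∀ p ∈ settled, destHit? d0 d1? p.1 p.2 = some false) →
      (∀ (r c : Nat), r < n → c < m →
        (((visited.getD r []).getD c false) = true ↔ ((r : Int), (c : Int)) ∈ settled)) →
      frontier.keys.Nodup →
      (∀ v, v ∈ settled → frontier.get? v = none) →
      (∀ v, v ∉ settled → frontier.get? v = cellMin heap v) →
      fc2 visited + 1 ≤ fuel →
      loopA grid n m d0 d1? heap visited = loopB grid n m d0 d1? fuel frontier settled := by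
  intro heap visited
  induction heap, visited using loopA.induct grid n m d0 d1? with
  | case1 heap visited hh =>
    intro frontier settled fuel hvl hvm hhb hdset hvs hnd hs hu hfuel
    have hheap : heap = [] := by
      cases heap with
      | nil => rfl
      | cons a t => simp [heapMin] at hh
    subst hheap
    have hall : ∀ k, frontier.get? k = none := by
      intro k
      by_cases hk : k ∈ settled
      · exact hs k hk
      · rw [hu k hk]; rfl
    have hitems : frontier.items = [] := dict_items_nil frontier hnd hall
    obtain ⟨fuel', rfl⟩ : ∃ k, fuel = k + 1 := ⟨fuel - 1, by omega⟩
    rw [loopA]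
    split
    · simp only [loopB, hitems]
      rfl
    · rename_i dist' cr' cc' heq
      rw [hh] at heq
      cases heq
  | case2 heap visited dist cr cc hh hdh =>
    -- destHit? = none: impossible, the popped cell is in bounds but d0 would have to equal
    -- its (in-bounds) row while destination has no second coordinate
    intro frontier settled fuel hvl hvm hhb hdset hvs hnd hs hu hfuel
    exfalso
    have hb := hhb _ (heapMin_mem hh)
    simp only at hb
    obtain ⟨he, hn1⟩ := destHit?_none_elim hdh
    exact hd1 hn1 ⟨by omega, by omega⟩
  | case3 heap visited dist cr cc hh hdh =>
    intro frontier settled fuel hvl hvm hhb hdset hvs hnd hs hu hfuel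
    obtain ⟨fuel', rfl⟩ : ∃ k, fuel = k + 1 := ⟨fuel - 1, by omega⟩
    have hcrs : ((cr, cc) : Int × Int) ∉ settled := by
      intro hmem
      have := hdset _ hmem
      simp only at this
      rw [hdh] at this
      cases this
    have hpop := pop_agree hh hnd hs hu hcrs
    rw [loopA]
    split
    · rename_i heq
      rw [hh] at heq
      cases heq
    · rename_i dist' cr' cc' heq
      rw [hh] at heq
      simp only [Option.some.injEq, Prod.mk.injEq] at heq
      obtain ⟨hq1, hq2, hq3⟩ := heq
      subst hq1; subst hq2; subst hq3
      simp only [hdh]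
      simp only [loopB, hpop]
      simp only [hdh]
  | case4 heap visited dist cr cc hh hdh hv =>
    intro frontier settled fuel hvl hvm hhb hdset hvs hnd hs hu hfuel
    exfalso
    have hb := hhb _ (heapMin_mem hh)
    simp only at hb
    rw [mat2Get?_eq hvm hb.1 (by omega) hb.2.2.1 (by omega)] at hv
    cases hv
  | case5 heap visited dist cr cc hh hdh hv ih =>
    intro frontier settled fuel hvl hvm hhb hdset hvs hnd hs hu hfuel
    have hb := hhb _ (heapMin_mem hh)
    simp only at hb
    have hvv := mat2Get?_eq hvm hb.1 (by omega) hb.2.2.1 (by omega)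
    rw [hv] at hvv
    have hvv' : (visited.getD cr.toNat []).getD cc.toNat false = true :=
      (Option.some.inj hvv).symm
    have hcrset : ((cr, cc) : Int × Int) ∈ settled := by
      have := (hvs cr.toNat cc.toNat (by omega) (by omega)).mp hvv'
      rwa [Int.toNat_of_nonneg hb.1, Int.toNat_of_nonneg hb.2.2.1] at this
    rw [loopA]
    split
    · rename_i heq
      rw [hh] at heq
      cases heq
    · rename_i dist' cr' cc' heq
      rw [hh] at heq
      simp only [Option.some.injEq, Prod.mk.injEq] at heq
      obtain ⟨hq1, hq2, hq3⟩ := heq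
      subst hq1; subst hq2; subst hq3
      simp only [hdh]
      split
      · rename_i heq'
        rw [hv] at heq'; simp at heq'
      · rename_i heq'
        exact ih frontier settled fuel hvl hvm
          (fun e he => hhb e (List.mem_of_mem_erase he))
          hdset hvs hnd hs
          (fun v hvns => by
            rw [hu v hvns, ← cellMin_erase (d := dist)
              (fun he => hvns (by rw [← he]; exact hcrset))])
          hfuel
      · rename_i heq'
        rw [hv] at heq'; simp at heq'
  | case6 heap visited dist cr cc hh hdh hv r1 c1 e1 r2 c2 e2 r3 c3 e3 r4 c4 e4 h4 h3 h2 h1 ih =>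
    intro frontier settled fuel hvl hvm hhb hdset hvs hnd hs hu hfuel
    have hb := hhb _ (heapMin_mem hh)
    simp only at hb
    have hvv := mat2Get?_eq hvm hb.1 (by omega) hb.2.2.1 (by omega)
    rw [hv] at hvv
    have hvv' : (visited.getD cr.toNat []).getD cc.toNat false = false :=
      (Option.some.inj hvv).symm
    have hcrns : ((cr, cc) : Int × Int) ∉ settled := by
      intro hmem
      have := (hvs cr.toNat cc.toNat (by omega) (by omega)).mpr (by
        rwa [Int.toNat_of_nonneg hb.1, Int.toNat_of_nonneg hb.2.2.1])
      rw [hvv'] at this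
      cases this
    obtain ⟨fuel', rfl⟩ : ∃ k, fuel = k + 1 := ⟨fuel - 1, by omega⟩
    have hpop := pop_agree hh hnd hs hu hcrns
    -- one step on each side
    rw [loopA]
    split
    · rename_i heq
      rw [hh] at heq
      cases heq
    · rename_i dist' cr' cc' heq
      rw [hh] at heq
      simp only [Option.some.injEq, Prod.mk.injEq] at heq
      obtain ⟨hq1, hq2, hq3⟩ := heq
      subst hq1; subst hq2; subst hq3
      simp only [hdh]
      split
      · rename_i heq'
        rw [hv] at heq'; simp at heq'
      · rename_i heq'
        rw [hv] at heq'; simp at heq'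
      rename_i heq'
      simp only [h1, h2, h3, h4]
      simp only [loopB, hpop]
      simp only [hdh]
      simp only [h1, h2, h3, h4]
      -- slide results: stationary or in bounds
      have hsb : ∀ {i j r' c' e' : Int},
          slideF grid (n : Int) (m : Int) i j cr cc dist = some (r', c', e') →
          0 ≤ r' ∧ r' < (n : Int) ∧ 0 ≤ c' ∧ c' < (m : Int) := by
        intro i j r' c' e' hsl
        rcases slide_bounds hsl with ⟨hr, hc, _⟩ | hbnd
        · subst hr; subst hc; exact ⟨hb.1, hb.2.1, hb.2.2.1, hb.2.2.2⟩
        · exact hbnd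
      have hb1 := hsb h1
      have hb2 := hsb h2
      have hb3 := hsb h3
      have hb4 := hsb h4
      -- invariant after the pop / settle
      have hdset' : ∀ p ∈ PySem.Set.add settled (cr, cc), destHit? d0 d1? p.1 p.2 = some false := by
        intro p hp
        rcases (PySem.Set.mem_add _ _ _).mp hp with hmem | he
        · exact hdset p hmem
        · rw [he]
          exact hdh
      have hnd0 := dict_nodup_keys_erase frontier (cr, cc) hnd
      have hs0 : ∀ v, v ∈ PySem.Set.add settled (cr, cc) →
          (frontier.erase (cr, cc)).get? v = none := by
        intro v hvmem
        by_cases hvw : v = ((cr, cc) : Int × Int)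
        · subst hvw; exact dict_get?_erase_self frontier _
        · rw [dict_get?_erase_of_ne frontier hvw]
          rcases (PySem.Set.mem_add _ _ _).mp hvmem with hvm' | he
          · exact hs v hvm'
          · exact absurd he hvw
      have hu0 : ∀ v, v ∉ PySem.Set.add settled (cr, cc) →
          (frontier.erase (cr, cc)).get? v = cellMin (heap.erase (dist, cr, cc)) v := by
        intro v hvmem
        have hvw : v ≠ ((cr, cc) : Int × Int) := by
          intro he; exact hvmem ((PySem.Set.mem_add _ _ _).mpr (Or.inr he))
        have hvns : v ∉ settled := by
          intro hmem; exact hvmem ((PySem.Set.mem_add _ _ _).mpr (Or.inl hmem))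
        rw [dict_get?_erase_of_ne frontier hvw, hu v hvns,
            ← cellMin_erase (d := dist) (fun he => hvw he.symm)]
      -- four relaxations
      obtain ⟨hnd1, hs1, hu1⟩ := relax_pres (w := (r1, c1)) (dnew := e1) hnd0 hs0 hu0
      obtain ⟨hnd2, hs2, hu2⟩ := relax_pres (w := (r2, c2)) (dnew := e2) hnd1 hs1 hu1
      obtain ⟨hnd3, hs3, hu3⟩ := relax_pres (w := (r3, c3)) (dnew := e3) hnd2 hs2 hu2
      obtain ⟨hnd4, hs4, hu4⟩ := relax_pres (w := (r4, c4)) (dnew := e4) hnd3 hs3 hu3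
      have happ : heap.erase (dist, cr, cc) ++ [((e1 : Int), (r1 : Int), (c1 : Int))] ++
          [((e2 : Int), (r2 : Int), (c2 : Int))] ++ [((e3 : Int), (r3 : Int), (c3 : Int))] ++
          [((e4 : Int), (r4 : Int), (c4 : Int))] =
          heap.erase (dist, cr, cc) ++ [(e1, r1, c1), (e2, r2, c2), (e3, r3, c3), (e4, r4, c4)] := by
        simp
      rw [happ] at hu4
      -- the updated visited matrix
      have hset := mat2Set_eq (v := visited) hb.1 (by omega) hb.2.2.1
      have hvl' : (mat2Set visited cr cc).length = n := by rw [hset, List.length_set, hvl]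
      have hvm' : ∀ row ∈ mat2Set visited cr cc, row.length = m := by
        rw [hset]
        intro row hrow
        rcases List.mem_or_eq_of_mem_set hrow with hmem | he
        · exact hvm row hmem
        · rw [he, List.length_set]
          exact hvm _ (List.getElem_mem _)
      have hvs' : ∀ (r c : Nat), r < n → c < m →
          ((((mat2Set visited cr cc).getD r []).getD c false) = true ↔
            ((r : Int), (c : Int)) ∈ PySem.Set.add settled (cr, cc)) := by
        intro r c hr hc
        rw [hset, getD_set_nat r [] (by omega), PySem.Set.mem_add]
        by_cases hre : r = cr.toNat
        · subst hre
          have hrowlen : cc.toNat < (visited[cr.toNat]'(by omega)).length := by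
            rw [hvm _ (List.getElem_mem _)]; omega
          rw [if_pos rfl, getD_set_nat c false hrowlen]
          have hgetrow : visited.getD cr.toNat [] = visited[cr.toNat]'(by omega) := by
            rw [List.getD_eq_getElem?_getD, List.getElem?_eq_getElem (by omega)]
            rfl
          by_cases hce : c = cc.toNat
          · subst hce
            rw [if_pos rfl]
            constructor
            · intro _
              right
              rw [Int.toNat_of_nonneg hb.1, Int.toNat_of_nonneg hb.2.2.1]
            · intro _; rfl
          · rw [if_neg hce, ← hgetrow, hvs cr.toNat c (by omega) hc]
            constructor
            · exact Or.inl
            · rintro (hmem | he)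
              · exact hmem
              · exfalso
                apply hce
                have : (c : Int) = cc := congrArg Prod.snd he
                omega
        · rw [if_neg hre, hvs r c hr hc]
          constructor
          · exact Or.inl
          · rintro (hmem | he)
            · exact hmem
            · exfalso
              apply hre
              have : (r : Int) = cr := congrArg Prod.fst he
              omega
      have hhb' : ∀ e ∈ heap.erase (dist, cr, cc) ++
          [((e1 : Int), r1, c1), (e2, r2, c2), (e3, r3, c3), (e4, r4, c4)],
          0 ≤ e.2.1 ∧ e.2.1 < (n : Int) ∧ 0 ≤ e.2.2 ∧ e.2.2 < (m : Int) := by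
        intro e he
        rcases List.mem_append.mp he with hmem | hmem
        · exact hhb e (List.mem_of_mem_erase hmem)
        · simp only [List.mem_cons, List.mem_singleton] at hmem
          rcases hmem with rfl | rfl | rfl | rfl | h
          · exact hb1
          · exact hb2
          · exact hb3
          · exact hb4
          · cases h
      have hfc := fc2_mat2Set_lt hv
      exact ih _ _ fuel' hvl' hvm' hhb' hdset' hvs' hnd4 hs4 hu4 (by omega)
  | case7 heap visited dist cr cc hh hdh hv himp =>
    intro frontier settled fuel hvl hvm hhb hdset hvs hnd hs hu hfuel
    exfalso
    have hb := hhb _ (heapMin_mem hh)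
    simp only at hb
    have hso : ∀ (i j : Int), (i = 0 ∧ j = 1) ∨ (i = 1 ∧ j = 0) ∨ (i = 0 ∧ j = -1) ∨
        (i = -1 ∧ j = 0) →
        ∃ r' c' e', slideF grid (n : Int) (m : Int) i j cr cc dist = some (r', c', e') := by
      intro i j hd
      have := slideF_isSome hn hrows dist hd hb.1 hb.2.1 hb.2.2.1 hb.2.2.2 (i := i) (j := j)
      cases hsl : slideF grid (n : Int) (m : Int) i j cr cc dist with
      | none => rw [hsl] at this; cases this
      | some out =>
        obtain ⟨r', c', e'⟩ := out
        exact ⟨r', c', e', rfl⟩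
    obtain ⟨r1, c1, e1, h1⟩ := hso 0 1 (by simp)
    obtain ⟨r2, c2, e2, h2⟩ := hso 1 0 (by simp)
    obtain ⟨r3, c3, e3, h3⟩ := hso 0 (-1) (by simp)
    obtain ⟨r4, c4, e4, h4⟩ := hso (-1) 0 (by simp)
    exact himp r1 c1 e1 r2 c2 e2 r3 c3 e3 r4 c4 e4 h1 h2 h3 h4

theorem pyGet?_one {α : Type} (a b : α) (t : List α) :
    PySem.List.pyGet? (a :: b :: t) 1 = some b := by
  have h1 : (1 : Int) = ((0 : Nat) : Int) + 1 := by norm_num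
  rw [h1, PySem.List.pyGet?_cons_succ]
  simp

theorem getD_replicate_lt {α : Type} {x d : α} {k n : Nat} (h : k < n) :
    (List.replicate n x).getD k d = x := by
  rw [List.getD_eq_getElem?_getD, List.getElem?_replicate, if_pos h]
  rfl

-- ---- wraparound matrix reads/writes (for the stuck-source case) ----
theorem pyGet?_replicate_wrap {α : Type} (x : α) {n : Nat} {i : Int}
    (h0 : -(n : Int) ≤ i) (h1 : i < (n : Int)) :
    PySem.List.pyGet? (List.replicate n x) i = some x := by
  simp only [PySem.List.pyGet?, PySem.List.pyIdx?, List.length_replicate]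
  split_ifs with ha hb hc
  all_goals try omega
  all_goals simp only [Option.bind_some, List.getElem?_replicate]
  all_goals rw [if_pos (by omega)]

theorem mat2Get?_set_self {v : List (List Bool)} {r c : Int} {b : Bool}
    (h : mat2Get? v r c = some b) : mat2Get? (mat2Set v r c) r c = some true := by
  unfold mat2Get? at h
  cases hrow : PySem.List.pyGet? v r with
  | none => simp [hrow] at h
  | some row =>
    rw [hrow] at h
    have hrowD : PySem.List.pyGetD v r [] = row := by
      simp [PySem.List.pyGetD, hrow]
    simp only [PySem.List.pyGet?] at hrow h
    cases ha : PySem.List.pyIdx? v.length r with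
    | none => simp [ha] at hrow
    | some a =>
      rw [ha] at hrow
      cases hb2 : PySem.List.pyIdx? row.length c with
      | none => simp [hb2] at h
      | some bb =>
        rw [hb2] at h
        simp only [Option.bind_some] at hrow h
        have haLt : a < v.length := by
          by_contra hcon
          rw [List.getElem?_eq_none (by omega)] at hrow
          simp at hrow
        have hbLt : bb < row.length := by
          by_contra hcon
          rw [List.getElem?_eq_none (by omega)] at h
          simp at h
        rw [List.getElem?_eq_getElem haLt] at hrow
        have hset : PySem.List.pySetD row c true = row.set bb true := by
          simp [PySem.List.pySetD, PySem.List.pySet?, hb2]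
        have hset2 : PySem.List.pySetD v r (row.set bb true) = v.set a (row.set bb true) := by
          simp [PySem.List.pySetD, PySem.List.pySet?, ha]
        unfold mat2Set mat2Get?
        rw [hrowD, hset, hset2]
        simp only [PySem.List.pyGet?, List.length_set, ha, Option.bind_some]
        rw [List.getElem?_set, if_pos rfl, if_pos haLt]
        simp only [Option.bind_some, List.length_set, hb2]
        rw [List.getElem?_set, if_pos rfl, if_pos hbLt]

-- ---- a blocked direction slides nowhere ----
theorem slideF_blocked {grid : List (List Int)} {s0 s1 i j d : Int}
    (hb : BlockedDir grid s0 s1 i j) :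
    slideF grid (grid.length : Int) ((grid.getD 0 []).length : Int) i j s0 s1 d =
      some (s0, s1, d) := by
  unfold slideF
  obtain ⟨k, hk⟩ : ∃ k, ((grid.length : Int) + ((grid.getD 0 []).length : Int)).toNat + 2
      = k + 1 := ⟨_, rfl⟩
  rw [hk, slide]
  split
  · rename_i hcond
    rcases hb with hoob | ⟨hlen, hval⟩
    · exact absurd hcond hoob
    · obtain ⟨hc1, hc2, hc3, hc4⟩ := hcond
      have hglt : (s0 + i).toNat < grid.length := by omega
      have hgr : PySem.List.pyGet? grid (s0 + i) = some (grid[(s0 + i).toNat]'hglt) :=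
        PySem.List.pyGet?_eq_some_getElem grid hc1 hc2
      simp only [hgr]
      have hrowD : grid.getD (s0 + i).toNat [] = grid[(s0 + i).toNat]'hglt := by
        rw [List.getD_eq_getElem?_getD, List.getElem?_eq_getElem hglt]
        rfl
      rw [hrowD] at hlen hval
      have hrw : PySem.List.pyGet? (grid[(s0 + i).toNat]'hglt) (s1 + j) =
          some ((grid[(s0 + i).toNat]'hglt)[(s1 + j).toNat]'(by omega)) :=
        PySem.List.pyGet?_eq_some_getElem _ hc3 (by omega)
      simp only [hrw]
      have hval' : (grid[(s0 + i).toNat]'hglt)[(s1 + j).toNat]'(by omega) ≠ 0 := by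
        rw [List.getD_eq_getElem?_getD, List.getElem?_eq_getElem (by omega)] at hval
        exact hval
      rw [if_neg hval']
  · rfl

-- ---- the stuck-source drain: A pops the source, then skips its four stale copies ----
theorem loopA_drain (grid : List (List Int)) (n m : Nat) (d0 : Int) (d1? : Option Int)
    {s0 s1 : Int} {visited : List (List Bool)}
    (hdh : destHit? d0 d1? s0 s1 = some false)
    (hvt : mat2Get? visited s0 s1 = some true) :
    ∀ (k : Nat) (heap : List (Int × Int × Int)), heap.length ≤ k →
      (∀ e ∈ heap, e = (0, s0, s1)) →
      loopA grid n m d0 d1? heap visited = some (-1) := by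
  intro k
  induction k with
  | zero =>
    intro heap hlen hall
    have hnil : heap = [] := List.eq_nil_of_length_eq_zero (by omega)
    subst hnil
    rw [loopA]
    split
    · rfl
    · rename_i dist' cr' cc' heq
      simp [heapMin] at heq
  | succ k ihk =>
    intro heap hlen hall
    cases heap with
    | nil =>
      rw [loopA]
      split
      · rfl
      · rename_i dist' cr' cc' heq
        simp [heapMin] at heq
    | cons e t =>
      have he := hall e List.mem_cons_self
      subst he
      have hmin : heapMin ((0, s0, s1) :: t) = some (0, s0, s1) := by
        cases hres : heapMin ((0, s0, s1) :: t) with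
        | none => simp [heapMin] at hres
        | some e' => rw [hall e' (heapMin_mem hres)]
      rw [loopA]
      split
      all_goals rename_i heq
      all_goals rw [hmin] at heq
      all_goals simp only [Option.some.injEq, Prod.mk.injEq] at heq
      obtain ⟨hq1, hq2, hq3⟩ := heq
      subst hq1; subst hq2; subst hq3
      simp only [hdh]
      split
      · rename_i heq'
        rw [hvt] at heq'
        cases heq'
      · rename_i heq'
        rw [List.erase_cons_head]
        exact ihk t (by simpa using hlen) (fun e he => hall e (List.mem_cons_of_mem _ he))
      · rename_i heq'
        rw [hvt] at heq'
        simp at heq'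

theorem loopA_stuck (grid : List (List Int)) (n m : Nat) (d0 : Int) (d1? : Option Int)
    {s0 s1 : Int} {visited : List (List Bool)}
    (hdh : destHit? d0 d1? s0 s1 = some false)
    (hm0 : mat2Get? visited s0 s1 = some false)
    (hsl1 : slideF grid (n : Int) (m : Int) 0 1 s0 s1 0 = some (s0, s1, 0))
    (hsl2 : slideF grid (n : Int) (m : Int) 1 0 s0 s1 0 = some (s0, s1, 0))
    (hsl3 : slideF grid (n : Int) (m : Int) 0 (-1) s0 s1 0 = some (s0, s1, 0))
    (hsl4 : slideF grid (n : Int) (m : Int) (-1) 0 s0 s1 0 = some (s0, s1, 0)) :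
    loopA grid n m d0 d1? [(0, s0, s1)] visited = some (-1) := by
  rw [loopA]
  split
  · rename_i heq
    simp [heapMin] at heq
  · rename_i dist' cr' cc' heq
    have hmin : heapMin [((0 : Int), s0, s1)] = some (0, s0, s1) := rfl
    rw [hmin] at heq
    simp only [Option.some.injEq, Prod.mk.injEq] at heq
    obtain ⟨hq1, hq2, hq3⟩ := heq
    subst hq1; subst hq2; subst hq3
    simp only [hdh]
    split
    · rename_i heq'
      rw [hm0] at heq'
      cases heq'
    · rename_i heq'
      rw [hm0] at heq'
      simp at heq'
    · rename_i heq'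
      simp only [hsl1, hsl2, hsl3, hsl4]
      rw [List.erase_cons_head]
      exact loopA_drain grid n m d0 d1? hdh (mat2Get?_set_self hm0) 4 _ (by simp)
        (by intro e he; simp at he; rcases he with rfl | rfl | rfl | rfl <;> rfl)

-- ---- B on a stuck source: one pop settles it, the four relaxations are no-ops ----
theorem relax_noop {settled : PySem.Set (Int × Int)} {f : PySem.Dict (Int × Int) Int}
    {w : Int × Int} {d : Int} (h : PySem.Set.contains settled w = true) :
    relax settled f w d = f := by
  unfold relax
  rw [if_neg]
  rintro ⟨hc, _⟩
  exact hc h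

theorem loopB_stuck (grid : List (List Int)) (n m : Nat) (d0 : Int) (d1? : Option Int)
    {s0 s1 : Int} (fuel : Nat)
    (hdh : destHit? d0 d1? s0 s1 = some false)
    (hsl1 : slideF grid (n : Int) (m : Int) 0 1 s0 s1 0 = some (s0, s1, 0))
    (hsl2 : slideF grid (n : Int) (m : Int) 1 0 s0 s1 0 = some (s0, s1, 0))
    (hsl3 : slideF grid (n : Int) (m : Int) 0 (-1) s0 s1 0 = some (s0, s1, 0))
    (hsl4 : slideF grid (n : Int) (m : Int) (-1) 0 s0 s1 0 = some (s0, s1, 0)) :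
    loopB grid n m d0 d1? (fuel + 2) (PySem.Dict.ofList [((s0, s1), 0)]) PySem.Set.empty
      = some (-1) := by
  have hitems : (PySem.Dict.ofList [(((s0, s1) : Int × Int), (0 : Int))]).items
      = [((s0, s1), 0)] := rfl
  have hminI : minItem (PySem.Dict.ofList [(((s0, s1) : Int × Int), (0 : Int))]).items
      = some ((s0, s1), 0) := rfl
  show loopB grid n m d0 d1? ((fuel + 1) + 1) _ _ = some (-1)
  rw [loopB]
  simp only [hminI]
  simp only [hdh]
  simp only [hsl1, hsl2, hsl3, hsl4]
  have hcont : PySem.Set.contains (PySem.Set.add PySem.Set.empty ((s0, s1) : Int × Int))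
      (s0, s1) = true := by
    rw [PySem.Set.contains_iff, PySem.Set.mem_add]
    exact Or.inr rfl
  rw [relax_noop hcont, relax_noop hcont, relax_noop hcont, relax_noop hcont]
  have herase : ((PySem.Dict.ofList [(((s0, s1) : Int × Int), (0 : Int))]).erase
      (s0, s1)).items = [] := by
    simp [PySem.Dict.erase, hitems]
  show loopB grid n m d0 d1? (fuel + 1) _ _ = some (-1)
  rw [loopB]
  rw [show minItem ((PySem.Dict.ofList [(((s0, s1) : Int × Int), (0 : Int))]).erase
      (s0, s1)).items = none by rw [herase]; rfl]

-- ---- first pop is the destination (source == destination) ----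
theorem loopA_hit (grid : List (List Int)) (n m : Nat) (d0 : Int) (d1? : Option Int)
    {s0 s1 : Int} (visited : List (List Bool))
    (hdh : destHit? d0 d1? s0 s1 = some true) :
    loopA grid n m d0 d1? [(0, s0, s1)] visited = some 0 := by
  rw [loopA]
  split
  · rename_i heq
    simp [heapMin] at heq
  · rename_i dist' cr' cc' heq
    have hmin : heapMin [((0 : Int), s0, s1)] = some (0, s0, s1) := rfl
    rw [hmin] at heq
    simp only [Option.some.injEq, Prod.mk.injEq] at heq
    obtain ⟨hq1, hq2, hq3⟩ := heq
    subst hq1; subst hq2; subst hq3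
    simp only [hdh]

theorem loopB_hit (grid : List (List Int)) (n m : Nat) (d0 : Int) (d1? : Option Int)
    {s0 s1 : Int} (fuel : Nat) (settled : PySem.Set (Int × Int))
    (hdh : destHit? d0 d1? s0 s1 = some true) :
    loopB grid n m d0 d1? (fuel + 1) (PySem.Dict.ofList [((s0, s1), 0)]) settled
      = some 0 := by
  have hminI : minItem (PySem.Dict.ofList [(((s0, s1) : Int × Int), (0 : Int))]).items
      = some ((s0, s1), 0) := rfl
  rw [loopB]
  simp only [hminI]
  simp only [hdh]

-- ===== VERDICT (by name: the statement is the Claim_ definition above) =====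
theorem solve_spec : Claim_equal_solve := by
  intro grid source destination _ hpre
  unfold Spec_solve
  obtain ⟨hne, hsl, hdl, hmain⟩ := hpre
  obtain ⟨row0, rest, rfl⟩ := List.exists_cons_of_ne_nil hne
  obtain ⟨s0, stail, rfl⟩ := List.exists_cons_of_ne_nil
    (l := source) (fun h => by subst h; simp at hsl)
  obtain ⟨s1, stail', rfl⟩ := List.exists_cons_of_ne_nil
    (l := stail) (fun h => by subst h; simp at hsl)
  obtain ⟨d0, dtail, rfl⟩ := List.exists_cons_of_ne_nil
    (l := destination) (fun h => by subst h; simp at hdl)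
  simp only [List.getD_cons_zero, List.getD_cons_succ] at hmain
  unfold solve solve_alt
  rw [PySem.List.pyGet?_zero_cons, PySem.List.pyGet?_zero_cons, PySem.List.pyGet?_zero_cons,
      pyGet?_one]
  set grid := row0 :: rest with hgrid
  set n := grid.length with hn
  set m := row0.length with hm
  set d1? := PySem.List.pyGet? (d0 :: dtail) 1 with hd1eq
  have hm_eq : (grid.getD 0 []).length = m := rfl
  rcases hmain with ⟨hd2, he0, he1⟩ | ⟨hw0, hw1, hw2, hw3, hok, hrest⟩
  · -- source == destination: the very first pop returns 0 on both sides
    obtain ⟨d1, dt2, rfl⟩ := List.exists_cons_of_ne_nil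
      (l := dtail) (fun h => by subst h; simp at hd2)
    simp only [List.getD_cons_zero] at he1
    have hdh : destHit? d0 d1? s0 s1 = some true := by
      rw [hd1eq, pyGet?_one]
      unfold destHit?
      rw [if_pos he0]
      simp [he1]
    have h1 := loopA_hit grid n m d0 d1?
      (List.replicate n (List.replicate m false)) hdh
    have h2 := loopB_hit grid n m d0 d1? (n * m + 1) PySem.Set.empty hdh
    exact congrArg (fun o => o.getD 0) (h1.trans h2.symm)
  · rcases hrest with hstuck | ⟨hrect, hs0, hs1⟩
    · -- stuck source: both sides drain to -1 (or hit the destination immediately)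
      obtain ⟨hb1, hb2, hb3, hb4⟩ := hstuck
      have hsl1 := slideF_blocked (d := 0) hb1
      have hsl2 := slideF_blocked (d := 0) hb2
      have hsl3 := slideF_blocked (d := 0) hb3
      have hsl4 := slideF_blocked (d := 0) hb4
      cases hv : destHit? d0 d1? s0 s1 with
      | none =>
        exfalso
        obtain ⟨heq0, hnone⟩ := destHit?_none_elim hv
        rw [hd1eq] at hnone
        cases dtail with
        | nil =>
          rcases hok with h2 | ⟨hne0, _⟩
          · simp at h2
          · exact hne0 heq0.symm
        | cons d1 dt => rw [pyGet?_one] at hnone; cases hnone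
      | some b =>
        cases b with
        | true =>
          have h1 := loopA_hit grid n m d0 d1?
            (List.replicate n (List.replicate m false)) hv
          have h2 := loopB_hit grid n m d0 d1? (n * m + 1) PySem.Set.empty hv
          exact congrArg (fun o => o.getD 0) (h1.trans h2.symm)
        | false =>
          have hm0 : mat2Get? (List.replicate n (List.replicate m false)) s0 s1
              = some false := by
            unfold mat2Get?
            rw [show PySem.List.pyGet? (List.replicate n (List.replicate m false)) s0
                = some (List.replicate m false) from
              pyGet?_replicate_wrap _ (by exact_mod_cast hw0) (by exact_mod_cast hw1)]
            exact pyGet?_replicate_wrap _ (by exact_mod_cast hw2) (by exact_mod_cast hw3)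
          have h1 := loopA_stuck grid n m d0 d1? hv hm0 hsl1 hsl2 hsl3 hsl4
          have h2 := loopB_stuck grid n m d0 d1? (n * m) hv hsl1 hsl2 hsl3 hsl4
          exact congrArg (fun o => o.getD 0) (h1.trans h2.symm)
    · -- in-bounds source on a rectangular-enough grid: the full simulation
      have hrows' : ∀ row ∈ grid, m ≤ row.length := hrect
      have hd1 : d1? = none → ¬(0 ≤ d0 ∧ d0 < (n : Int)) := by
        intro hnone
        rw [hd1eq] at hnone
        cases dtail with
        | nil =>
          rcases hok with h2 | ⟨_, hnb⟩
          · simp at h2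
          · exact hnb
        | cons d1 dt => rw [pyGet?_one] at hnone; cases hnone
      have hitems0 : (PySem.Dict.ofList [(((s0, s1) : Int × Int), (0 : Int))]).items
          = [((s0, s1), 0)] := rfl
      have happly := sim grid n m d0 d1? rfl hrows' hd1 [(0, s0, s1)]
        (List.replicate n (List.replicate m false))
        (PySem.Dict.ofList [((s0, s1), 0)]) PySem.Set.empty (n * m + 2)
        (by simp)
        (by intro row hrow; rw [List.eq_of_mem_replicate hrow]; simp)
        (by rintro e he
            simp only [List.mem_singleton] at he
            subst he
            exact ⟨hs0, by exact_mod_cast hw1, hs1, by exact_mod_cast hw3⟩)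
        (by intro p hp; simp [PySem.Set.empty] at hp)
        (by intro r c hr hc
            rw [getD_replicate_lt hr, getD_replicate_lt hc]
            simp [PySem.Set.empty])
        (by simp [PySem.Dict.keys, hitems0])
        (by intro v hv; simp [PySem.Set.empty] at hv)
        (by intro v _
            rw [show (PySem.Dict.ofList [(((s0, s1) : Int × Int), (0 : Int))])
                = PySem.Dict.mk [((s0, s1), 0)] from rfl]
            rw [PySem.Dict.get?_mk_cons]
            by_cases hv : ((s0, s1) : Int × Int) = v
            · rw [if_pos (by simp [hv])]
              simp [cellMin, hv]
            · rw [if_neg (by simp [hv]), show PySem.Dict.get? (PySem.Dict.mk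
                ([] : List ((Int × Int) × Int))) v = none from rfl]
              simp [cellMin, hv])
        (by rw [fc2_init]; omega)
      exact congrArg (fun o => o.getD 0) happly
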